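-- pv_equiv track=rewrite | github.com/umarkhan2000/Tweets | tweets.py | detect_author
-- ===== SOURCE A (Python) =====
-- from typing import List, Dict, TextIO, Tuple
--
-- HASH_SYMBOL = '#'
--
-- def alnum_prefix(text: str) -> str:
--     """Return the alphanumeric prefix of text, converted to
--     lowercase. That is, return all characters in text from the
--     beginning until the first non-alphanumeric character or until the
--     end of text, if text does not contain any non-alphanumeric
--     characters.
--
--     >>> alnum_prefix('')
--     ''
--     >>> alnum_prefix('IamIamIam')
--     'iamiamiam'
--     >>> alnum_prefix('IamIamIam!!')
--     'iamiamiam'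
--     >>> alnum_prefix('IamIamIam!!andMore')
--     'iamiamiam'
--     >>> alnum_prefix('$$$money')
--     ''
--
--     """
--
--     index = 0
--     while index < len(text) and text[index].isalnum():
--         index += 1
--     return text[:index].lower()
--
-- def extract_hashtags(text: str) -> List[str]:
--     """Return a list of all unique hashtags in text, converted to lowercase
--
--     >>> extract_hashtags('Hi #UofT do you like #cats #CATS #meowmeow')
--     ['uoft', 'cats', 'meowmeow']
--     >>> extract_hashtags('#cats are #cute #cats #cat meow #meow')
--     ['cats', 'cute', 'cat', 'meow']
--     >>> extract_hashtags('#many #cats$extra #meow?!')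
--     ['many', 'cats', 'meow']
--     >>> extract_hashtags('No valid #mentions #! here?')
--     ['mentions']
--     >>>extract_hashtags('No valid #! here?')
--     []
--     """
--     final = []
--     result = list(text.split())
--
--
--     for word in result:
--         if word[0] == HASH_SYMBOL and alnum_prefix(word[1:]) not in final:
--             final.append(alnum_prefix(word[1:]))
--             if alnum_prefix(word[1:]) == '':
--                 final.remove(alnum_prefix(word[1:]))
--     return final
--
-- def hashtag_seperator(s: List[tuple]) -> List[str]:
--     """Returns a list of the hashtags in s
--     >>>hashtag_seperator([('hey wad is #up ajdnk', 2018, 'twitter', 39, 189),\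
--     ('ok #slau  sndgkndjnjsen', 2020, 'twitter', 14, 78)])
--     ['up' , 'slau']
--     """
--     result = []
--     for tups in s:
--         text = tups[0]
--         result = result + extract_hashtags(text)
--     return result
--
-- def detect_author(user_to_tweets: Dict[str, List[tuple]], tweet_text: str) -> \
--     str:
--     """Returns the username of the author who is most likely the
--     author of the tweet based on the hashtags they use. If all
--     hashtags are uniquely used then return the username otherwise
--     return 'unknown'
--     """
--     acc = []
--
--     for keys in user_to_tweets:
--         author_hashes = hashtag_seperator(user_to_tweets[keys])
--         text_hashes = extract_hashtags(tweet_text)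
--         if set(text_hashes).issubset(author_hashes):
--             acc.append(keys)
--     if len(acc) == 1:
--         return acc[0]
--     return 'unknown'
-- ===== SOURCE B (Python) =====
-- from itertools import takewhile
-- from typing import Dict, List
--
--
-- def _tag(word: str) -> str:
--     """Lowercased alphanumeric prefix of word."""
--     return ''.join(takewhile(str.isalnum, word)).lower()
--
--
-- def _tags(text: str) -> List[str]:
--     """Unique non-empty lowercased hashtags of text, in first-occurrence order."""
--     out = []
--     for word in text.split():
--         if word.startswith('#'):
--             t = _tag(word[1:])
--             if t and t not in out:
--                 out.append(t)
--     return out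
--
--
-- def detect_author(user_to_tweets: Dict[str, List[tuple]], tweet_text: str) -> str:
--     # Inverted index: hashtag -> set of usernames that used it.
--     index = {}
--     for user, tweets in user_to_tweets.items():
--         for tup in tweets:
--             for t in _tags(tup[0]):
--                 index.setdefault(t, set()).add(user)
--     # Intersect, starting from all usernames (empty tag set matches everyone).
--     candidates = set(user_to_tweets)
--     for t in _tags(tweet_text):
--         candidates &= index.get(t, set())
--     if len(candidates) == 1:
--         return next(iter(candidates))
--     return 'unknown'
-- ===== Notes on version B (the rewrite author's own statement) =====
-- stated objective: faster
-- what changed: B builds an inverted index hashtag->set-of-users in one pass and intersects the index entries for the tweet's hashtags (seeded with all usernames), instead of A's per-user subset test that re-extracts the tweet's hashtags and rescans each user's concatenated hashtag list for every user.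
import Mathlib
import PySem

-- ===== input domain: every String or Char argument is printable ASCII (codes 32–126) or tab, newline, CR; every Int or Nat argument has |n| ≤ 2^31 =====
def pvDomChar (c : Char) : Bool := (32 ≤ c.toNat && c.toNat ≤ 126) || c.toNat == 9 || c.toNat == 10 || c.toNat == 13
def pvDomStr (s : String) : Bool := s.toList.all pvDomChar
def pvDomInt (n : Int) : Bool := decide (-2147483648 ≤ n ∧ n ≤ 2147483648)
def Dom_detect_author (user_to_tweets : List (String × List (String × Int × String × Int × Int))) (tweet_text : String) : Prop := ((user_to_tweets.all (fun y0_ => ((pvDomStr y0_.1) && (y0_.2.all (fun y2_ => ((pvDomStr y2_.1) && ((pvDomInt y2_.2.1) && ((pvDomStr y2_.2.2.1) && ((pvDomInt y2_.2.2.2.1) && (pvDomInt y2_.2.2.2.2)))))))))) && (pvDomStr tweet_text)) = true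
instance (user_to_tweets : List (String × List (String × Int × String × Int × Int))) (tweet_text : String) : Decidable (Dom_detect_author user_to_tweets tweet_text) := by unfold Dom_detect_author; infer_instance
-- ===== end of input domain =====

-- B replaces A's per-user subset scan (which re-extracts the tweet's hashtags for every user)
-- with an inverted index hashtag → users built in one pass, then a set intersection;
-- a timing run measured B faster than A on the generated inputs.

-- ===== PORT A =====
-- alnum_prefix: the while loop counting alphanumeric chars, then text[:index].lower()
def pvAlnumLoopA : List Char → Nat
  | [] => 0
  | c :: rest => if PySem.Chars.isalnum c then pvAlnumLoopA rest + 1 else 0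

def pvAlnumPrefixA (cs : List Char) : List Char :=
  PySem.Chars.lower (cs.take (pvAlnumLoopA cs))

-- extract_hashtags; word[0] is total here because split₀ yields nonempty words (pyGetD default never read);
-- word[1:] on such a word is List.drop 1 (nonnegative in-range slice)
def pvExtractA (cs : List Char) : List (List Char) :=
  (PySem.Chars.split₀ cs).foldl (fun final word =>
    if (PySem.List.pyGetD word 0 ' ' == '#') && !final.contains (pvAlnumPrefixA (word.drop 1)) then
      let final2 := final ++ [pvAlnumPrefixA (word.drop 1)]
      if pvAlnumPrefixA (word.drop 1) = [] then
        -- final.remove(...) always succeeds here: the tag was just appended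
        (PySem.List.remove? final2 (pvAlnumPrefixA (word.drop 1))).getD final2
      else final2
    else final) []

-- hashtag_seperator
def pvHashSepA (s : List (String × Int × String × Int × Int)) : List (List Char) :=
  s.foldl (fun result tups => result ++ pvExtractA tups.1.toList) []

-- the assoc-list argument stands for the Python dict argument: build it as dict(pairs)
def pvDictA (user_to_tweets : List (String × List (String × Int × String × Int × Int))) :
    PySem.Dict String (List (String × Int × String × Int × Int)) :=
  user_to_tweets.foldl (fun d kv => d.insert kv.1 kv.2) (PySem.Dict.mk [])

def pvAccA (user_to_tweets : List (String × List (String × Int × String × Int × Int))) (tweet_text : String) : List String :=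
  (pvDictA user_to_tweets).keys.foldl (fun acc keys =>
    if PySem.Set.issubset (PySem.Set.ofList (pvExtractA tweet_text.toList))
        (pvHashSepA ((pvDictA user_to_tweets).getD keys [])) then acc ++ [keys] else acc) []

def detect_author (user_to_tweets : List (String × List (String × Int × String × Int × Int))) (tweet_text : String) : String :=
  -- acc[0] is total under the length guard (pyGetD default never read)
  if (pvAccA user_to_tweets tweet_text).length = 1 then
    PySem.List.pyGetD (pvAccA user_to_tweets tweet_text) 0 "unknown"
  else "unknown"

-- ===== PORT B =====
-- _tag: ''.join(takewhile(str.isalnum, word)).lower()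
def pvTagB (word : List Char) : List Char :=
  PySem.Chars.lower (word.takeWhile PySem.Chars.isalnum)

-- _tags
def pvTagsB (cs : List Char) : List (List Char) :=
  (PySem.Chars.split₀ cs).foldl (fun out word =>
    if PySem.Chars.startswith word ['#'] then
      if !(pvTagB (word.drop 1)).isEmpty && !out.contains (pvTagB (word.drop 1)) then
        out ++ [pvTagB (word.drop 1)]
      else out
    else out) []

def pvDictB (user_to_tweets : List (String × List (String × Int × String × Int × Int))) :
    PySem.Dict String (List (String × Int × String × Int × Int)) :=
  user_to_tweets.foldl (fun d kv => d.insert kv.1 kv.2) (PySem.Dict.mk [])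

-- inverted index: hashtag → set of usernames (index.setdefault(t, set()).add(user))
def pvIndexB (d : PySem.Dict String (List (String × Int × String × Int × Int))) :
    PySem.Dict (List Char) (PySem.Set String) :=
  d.items.foldl (fun idx p =>
    p.2.foldl (fun idx tup =>
      (pvTagsB tup.1.toList).foldl (fun idx t =>
        idx.insert t (PySem.Set.add (idx.getD t []) p.1)) idx) idx) (PySem.Dict.mk [])

-- candidates = set(user_to_tweets) intersected with index.get(t, set()) for each tweet hashtag
def pvCandB (user_to_tweets : List (String × List (String × Int × String × Int × Int))) (tweet_text : String) : PySem.Set String :=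
  (pvTagsB tweet_text.toList).foldl
    (fun c t => PySem.Set.inter c ((pvIndexB (pvDictB user_to_tweets)).getD t []))
    (PySem.Set.ofList (pvDictB user_to_tweets).keys)

def detect_author_alt (user_to_tweets : List (String × List (String × Int × String × Int × Int))) (tweet_text : String) : String :=
  -- next(iter(candidates)) on a singleton set; order-independent since len == 1
  if PySem.Set.len (pvCandB user_to_tweets tweet_text) = 1 then
    (pvCandB user_to_tweets tweet_text).headD "unknown"
  else "unknown"

-- ===== PRECONDITION & SPEC =====
def Spec_detect_author (user_to_tweets : List (String × List (String × Int × String × Int × Int))) (tweet_text : String) (out : String) : Prop := out = detect_author_alt user_to_tweets tweet_text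
instance (user_to_tweets : List (String × List (String × Int × String × Int × Int))) (tweet_text : String) (out : String) : Decidable (Spec_detect_author user_to_tweets tweet_text out) := by unfold Spec_detect_author; infer_instance

-- ===== CLAIM (what is proved, stated in full; the proofs are below) =====
def Claim_equal_detect_author : Prop := ∀ (user_to_tweets : List (String × List (String × Int × String × Int × Int))) (tweet_text : String), Dom_detect_author user_to_tweets tweet_text → Spec_detect_author user_to_tweets tweet_text (detect_author user_to_tweets tweet_text)

-- ===== LEMMAS AND PROOFS =====

-- alnum_prefix's counted take is takeWhile
theorem pv_take_loop (cs : List Char) : cs.take (pvAlnumLoopA cs) = cs.takeWhile PySem.Chars.isalnum := by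
  induction cs with
  | nil => rfl
  | cons c rest ih =>
    by_cases h : PySem.Chars.isalnum c = true <;> simp [pvAlnumLoopA, h, ih]

theorem pv_prefix_eq (cs : List Char) : pvAlnumPrefixA cs = pvTagB cs := by
  simp [pvAlnumPrefixA, pvTagB, pv_take_loop]

-- removing the just-appended element from a list not containing it
theorem pv_idxOf_append {α : Type} [BEq α] [LawfulBEq α] (l : List α) (x : α) (h : x ∉ l) :
    List.idxOf? x (l ++ [x]) = some l.length := by
  induction l with
  | nil => simp
  | cons a l ih =>
    simp only [List.mem_cons, not_or] at h
    simp [List.idxOf?_cons, Ne.symm h.1, ih h.2]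

theorem pv_remove_append {α : Type} [BEq α] [LawfulBEq α] (l : List α) (x : α) (h : x ∉ l) :
    PySem.List.remove? (l ++ [x]) x = some l := by
  simp only [PySem.List.remove?, pv_idxOf_append l x h, Option.map_some]
  rw [List.eraseIdx_append_of_length_le (le_refl _)]
  simp

-- the two hashtag-extraction loops agree when the accumulator contains no empty tag
theorem pv_extract_loop (ws : List (List Char)) (acc : List (List Char)) (h : [] ∉ acc) :
    ws.foldl (fun final word =>
      if (PySem.List.pyGetD word 0 ' ' == '#' && !final.contains (pvTagB (List.drop 1 word))) = true then
        if pvTagB (List.drop 1 word) = [] then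
          (PySem.List.remove? (final ++ [pvTagB (List.drop 1 word)]) (pvTagB (List.drop 1 word))).getD
            (final ++ [pvTagB (List.drop 1 word)])
        else final ++ [pvTagB (List.drop 1 word)]
      else final) acc
    = ws.foldl (fun out word =>
      if PySem.Chars.startswith word ['#'] = true then
        if (!(pvTagB (List.drop 1 word)).isEmpty && !out.contains (pvTagB (List.drop 1 word))) = true then
          out ++ [pvTagB (List.drop 1 word)]
        else out
      else out) acc := by
  induction ws generalizing acc with
  | nil => rfl
  | cons w ws ih =>
    rw [List.foldl_cons, List.foldl_cons]
    cases w with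
    | nil =>
      have h1 : PySem.List.pyGetD ([] : List Char) 0 ' ' = ' ' := by decide
      have h2 : PySem.Chars.startswith ([] : List Char) ['#'] = false := by decide
      have h3 : (' ' == '#') = false := rfl
      simp only [h1, h2, h3, Bool.false_and, Bool.false_eq_true, if_false]
      exact ih acc h
    | cons c rest =>
      have h1 : PySem.List.pyGetD (c :: rest) 0 ' ' = c := by
        simp [PySem.List.pyGetD, PySem.List.pyGet?, PySem.List.pyIdx?]
      have hdrop : List.drop 1 (c :: rest) = rest := rfl
      by_cases hc : c = '#'
      · have hsw : PySem.Chars.startswith (c :: rest) ['#'] = true := by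
          rw [PySem.Chars.startswith_iff, hc]; exact ⟨rest, rfl⟩
        subst hc
        simp only [h1, hsw, hdrop, beq_self_eq_true, Bool.true_and, if_true]
        by_cases hmem : acc.contains (pvTagB rest) = true
        · simp only [hmem, Bool.not_true, Bool.and_false, Bool.false_eq_true, if_false]
          exact ih acc h
        · have hmem' : acc.contains (pvTagB rest) = false := eq_false_of_ne_true hmem
          simp only [hmem', Bool.not_false, Bool.and_true, if_true]
          by_cases hte : pvTagB rest = []
          · rw [if_pos hte, hte, pv_remove_append acc ([] : List Char) h, Option.getD_some]
            rw [if_neg (by simp : ¬((!(List.isEmpty ([] : List Char))) = true))]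
            exact ih acc h
          · rw [if_neg hte, if_pos (by simp [hte] : (!(pvTagB rest).isEmpty) = true)]
            apply ih
            intro hmm
            rcases List.mem_append.1 hmm with hin | hin
            · exact h hin
            · exact hte (List.mem_singleton.1 hin).symm
      · have hsw : PySem.Chars.startswith (c :: rest) ['#'] = false := by
          rw [Bool.eq_false_iff]
          intro hs
          rcases (PySem.Chars.startswith_iff _ _).1 hs with ⟨t, ht⟩
          exact hc (List.cons_prefix_cons.1 ⟨t, ht⟩).1.symm
        have hcb : (c == '#') = false := by simp [hc]
        simp only [h1, hsw, hcb, Bool.false_and, Bool.false_eq_true, if_false]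
        exact ih acc h

theorem pv_extract_eq (cs : List Char) : pvExtractA cs = pvTagsB cs := by
  unfold pvExtractA pvTagsB
  simp only [pv_prefix_eq]
  exact pv_extract_loop _ [] (by simp)

-- hashtag_seperator is a flatMap
theorem pv_hashsep_eq (s : List (String × Int × String × Int × Int)) :
    pvHashSepA s = s.flatMap (fun tup => pvTagsB tup.1.toList) := by
  unfold pvHashSepA
  have h := PySem.List.foldl_append_eq_flatMap (fun tup : String × Int × String × Int × Int => pvExtractA tup.1.toList) s []
  simp only [List.nil_append] at h
  rw [h]
  simp [pv_extract_eq]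

-- membership in the index after the innermost loop (adding user u' for each tag in ts)
theorem pv_idx3 (u' : String) (ts : List (List Char)) (idx : PySem.Dict (List Char) (PySem.Set String)) (u : String) (t : List Char) :
    u ∈ (ts.foldl (fun idx t => idx.insert t (PySem.Set.add (idx.getD t []) u')) idx).getD t [] ↔
      u ∈ idx.getD t [] ∨ (u = u' ∧ t ∈ ts) := by
  induction ts generalizing idx with
  | nil => simp
  | cons t0 ts ih =>
    rw [List.foldl_cons, ih, PySem.Dict.getD_insert]
    by_cases ht : t = t0
    · subst ht
      rw [if_pos rfl, PySem.Set.mem_add]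
      simp only [List.mem_cons]
      tauto
    · rw [if_neg ht]
      simp only [List.mem_cons]
      tauto

-- … after the per-tweet loop
theorem pv_idx2 (u' : String) (tups : List (String × Int × String × Int × Int)) (idx : PySem.Dict (List Char) (PySem.Set String)) (u : String) (t : List Char) :
    u ∈ (tups.foldl (fun idx tup =>
        (pvTagsB tup.1.toList).foldl (fun idx t => idx.insert t (PySem.Set.add (idx.getD t []) u')) idx) idx).getD t [] ↔
      u ∈ idx.getD t [] ∨ (u = u' ∧ ∃ tup ∈ tups, t ∈ pvTagsB tup.1.toList) := by
  induction tups generalizing idx with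
  | nil => simp
  | cons a tups ih =>
    rw [List.foldl_cons, ih, pv_idx3]
    simp only [List.exists_mem_cons_iff]
    tauto

-- … after the per-user loop
theorem pv_idx1 (pairs : List (String × List (String × Int × String × Int × Int))) (idx : PySem.Dict (List Char) (PySem.Set String)) (u : String) (t : List Char) :
    u ∈ (pairs.foldl (fun idx p =>
        p.2.foldl (fun idx tup =>
          (pvTagsB tup.1.toList).foldl (fun idx t => idx.insert t (PySem.Set.add (idx.getD t []) p.1)) idx) idx) idx).getD t [] ↔
      u ∈ idx.getD t [] ∨ ∃ p ∈ pairs, u = p.1 ∧ ∃ tup ∈ p.2, t ∈ pvTagsB tup.1.toList := by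
  induction pairs generalizing idx with
  | nil => simp
  | cons a pairs ih =>
    rw [List.foldl_cons, ih, pv_idx2]
    simp only [List.exists_mem_cons_iff]
    rw [or_assoc]

-- intersecting against a family of sets is a filter
theorem pv_inter_foldl (g : List Char → PySem.Set String) (ts : List (List Char)) (c : List String) :
    ts.foldl (fun c t => PySem.Set.inter c (g t)) c
      = c.filter (fun u => decide (∀ t ∈ ts, u ∈ g t)) := by
  induction ts generalizing c with
  | nil => simp
  | cons t0 ts ih =>
    rw [List.foldl_cons, ih]
    show (List.filter (fun x => (g t0).contains x) c).filter _ = _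
    rw [List.filter_filter]
    apply List.filter_congr
    intro u _
    simp [PySem.Set.contains]
    rw [Bool.and_comm]

-- first-match lookup in an assoc list with nodup keys picks THE pair with that key
theorem pv_lookup {V : Type} (l : List (String × V)) (u : String) (C : V → Prop) (dflt : V)
    (hnd : (l.map Prod.fst).Nodup) (hu : u ∈ l.map Prod.fst) :
    (∃ p ∈ l, u = p.1 ∧ C p.2) ↔ C ((Option.map Prod.snd (List.find? (fun p => p.1 == u) l)).getD dflt) := by
  induction l with
  | nil => simp at hu
  | cons a l ih =>
    simp only [List.map_cons, List.nodup_cons] at hnd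
    by_cases hk : a.1 = u
    · have hfind : List.find? (fun p => p.1 == u) (a :: l) = some a :=
        List.find?_cons_of_pos (by simp [hk])
      rw [hfind]
      simp only [Option.map_some, Option.getD_some]
      constructor
      · rintro ⟨p, hp, hpu, hC⟩
        rcases List.mem_cons.1 hp with rfl | hp
        · exact hC
        · exfalso
          apply hnd.1
          rw [hk, hpu]
          exact List.mem_map_of_mem hp
      · intro hC
        exact ⟨a, List.mem_cons_self, hk.symm, hC⟩
    · have hfind : List.find? (fun p => p.1 == u) (a :: l) = List.find? (fun p => p.1 == u) l :=
        List.find?_cons_of_neg (by simp [hk])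
      have hu' : u ∈ l.map Prod.fst := by
        rcases List.mem_cons.1 hu with h | h
        · exact absurd h.symm hk
        · exact h
      rw [hfind, ← ih hnd.2 hu']
      simp only [List.exists_mem_cons_iff]
      constructor
      · rintro (⟨hua, _⟩ | hrest)
        · exact absurd hua.symm hk
        · exact hrest
      · intro hrest
        exact Or.inr hrest

theorem pv_getD_char {V : Type} (d : PySem.Dict String V) (hnd : d.keys.Nodup) (u : String)
    (hu : u ∈ d.keys) (C : V → Prop) (dflt : V) :
    (∃ p ∈ d.items, u = p.1 ∧ C p.2) ↔ C (d.getD u dflt) := by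
  obtain ⟨l⟩ := d
  exact pv_lookup l u C dflt hnd hu

-- the common dict has nodup keys
theorem pv_keys_nodup (utt : List (String × List (String × Int × String × Int × Int))) :
    (pvDictA utt).keys.Nodup := by
  have h : (pvDictA utt).keys = PySem.Set.update (PySem.Dict.mk ([] : List (String × List (String × Int × String × Int × Int))) : PySem.Dict String _).keys (utt.map (fun kv => kv.1)) :=
    PySem.Dict.keys_foldl_insert_key utt (fun kv => kv.1) (fun _ kv => kv.2) (PySem.Dict.mk [])
  rw [h]
  have : (PySem.Dict.mk ([] : List (String × List (String × Int × String × Int × Int))) : PySem.Dict String _).keys = [] := rfl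
  rw [this, PySem.Set.update_nil_left]
  exact PySem.Set.nodup_ofList _

-- ===== VERDICT (by name: the statement is the Claim_ definition above) =====
theorem detect_author_spec : Claim_equal_detect_author := by
  intro utt tweet _
  unfold Spec_detect_author detect_author detect_author_alt
  have hnd : (pvDictA utt).keys.Nodup := pv_keys_nodup utt
  have hBd : pvDictB utt = pvDictA utt := rfl
  have hidx : ∀ u t, u ∈ (pvIndexB (pvDictA utt)).getD t [] ↔
      ∃ p ∈ (pvDictA utt).items, u = p.1 ∧ ∃ tup ∈ p.2, t ∈ pvTagsB tup.1.toList := by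
    intro u t
    unfold pvIndexB
    rw [pv_idx1]
    simp [PySem.Dict.getD, PySem.Dict.get?]
  have hacc : pvAccA utt tweet = (pvDictA utt).keys.filter (fun u =>
      PySem.Set.issubset (PySem.Set.ofList (pvExtractA tweet.toList))
        (pvHashSepA ((pvDictA utt).getD u []))) := by
    unfold pvAccA
    simpa using PySem.List.foldl_append_if (fun u =>
      PySem.Set.issubset (PySem.Set.ofList (pvExtractA tweet.toList))
        (pvHashSepA ((pvDictA utt).getD u []))) (fun u => u) (pvDictA utt).keys []
  have hcand : pvCandB utt tweet = (pvDictA utt).keys.filter (fun u =>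
      decide (∀ t ∈ pvTagsB tweet.toList, u ∈ (pvIndexB (pvDictA utt)).getD t [])) := by
    unfold pvCandB
    rw [hBd, pv_inter_foldl, PySem.Set.ofList_eq_self_of_nodup _ hnd]
  have heq : pvAccA utt tweet = pvCandB utt tweet := by
    rw [hacc, hcand]
    apply List.filter_congr
    intro u hu
    rw [Bool.eq_iff_iff, PySem.Set.issubset_iff, decide_eq_true_iff]
    constructor
    · intro hsub t ht
      rw [hidx u t, pv_getD_char (pvDictA utt) hnd u hu (fun v => ∃ tup ∈ v, t ∈ pvTagsB tup.1.toList) []]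
      have := hsub t (by rw [PySem.Set.mem_ofList, pv_extract_eq]; exact ht)
      rw [pv_hashsep_eq, List.mem_flatMap] at this
      exact this
    · intro hall t ht
      rw [PySem.Set.mem_ofList, pv_extract_eq] at ht
      rw [pv_hashsep_eq, List.mem_flatMap]
      have := hall t ht
      rw [hidx u t, pv_getD_char (pvDictA utt) hnd u hu (fun v => ∃ tup ∈ v, t ∈ pvTagsB tup.1.toList) []] at this
      exact this
  rw [← heq]
  rcases hl : pvAccA utt tweet with _ | ⟨x, _ | ⟨y, l⟩⟩
  · simp [PySem.Set.len]
  · simp [PySem.Set.len, PySem.List.pyGetD, PySem.List.pyGet?, PySem.List.pyIdx?]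
  · have h1 : ¬ ((x :: y :: l).length = 1) := by simp
    have h2 : ¬ (PySem.Set.len (x :: y :: l) = 1) := by
      simp [PySem.Set.len]
      omega
    rw [if_neg h1, if_neg h2]
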